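-- pv_equiv track=rewrite | github.com/kishankumar-dev/GFG_work | Difficulty: Medium/ASCII Range Sum/ascii-range-sum.py | asciirange
-- ===== SOURCE A (Python) =====
-- def asciirange(s):
--     # code here
--     n = len(s)
--     dp = [0]*n
--
--     acc = 0
--     for i, e in enumerate(s):
--         acc += ord(e)
--         dp[i] = acc
--
--     # remember the last occurence position if any
--     m = {}
--     for i in range(n-1, -1, -1):
--         e = s[i]
--         if e not in m:
--             m[e] = i
--     ans = []
--     for i, e in enumerate(s):
--         if e in m and m[e] - i > 1:
--             ans.append(dp[m[e]-1] - dp[i])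
--             m.pop(e)
--     return ans
-- ===== SOURCE B (Python) =====
-- def asciirange(s):
--     first = {}
--     last = {}
--     for i, c in enumerate(s):
--         if c not in first:
--             first[c] = i
--         last[c] = i
--     ans = []
--     for c, f in first.items():
--         l = last[c]
--         if l - f > 1:
--             ans.append(sum(ord(ch) for ch in s[f + 1:l]))
--     return ans
-- ===== Notes on version B (the rewrite author's own statement) =====
-- stated objective: simpler
-- what changed: Replaces A's prefix-sum table and reverse-scan last-occurrence dict with pop during the answer loop by one forward pass building first/last occurrence dicts and a direct scan-sum of each in-between slice.
import Mathlib
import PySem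

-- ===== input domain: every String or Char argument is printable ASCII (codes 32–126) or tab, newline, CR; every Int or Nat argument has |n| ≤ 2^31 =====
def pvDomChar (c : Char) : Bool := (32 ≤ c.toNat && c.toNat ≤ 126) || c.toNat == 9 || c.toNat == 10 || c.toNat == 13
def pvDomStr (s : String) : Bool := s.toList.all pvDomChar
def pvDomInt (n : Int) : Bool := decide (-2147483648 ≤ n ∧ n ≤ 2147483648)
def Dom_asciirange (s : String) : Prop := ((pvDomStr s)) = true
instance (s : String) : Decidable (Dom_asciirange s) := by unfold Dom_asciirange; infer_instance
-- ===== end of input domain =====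

-- B replaces A's prefix-sum table and last-occurrence/pop dict by one forward pass building
-- first/last occurrence dicts, then sums each in-between slice directly (objective: simpler).

-- ===== PORT A =====
def asciirange (s : String) : List Int :=
  let l := s.toList
  let n : Int := (l.length : Int)
  -- dp = [0]*n; acc = 0; for i, e in enumerate(s): acc += ord(e); dp[i] = acc
  let st := (PySem.List.enumerate l 0).foldl
      (fun (st : Int × List Int) (p : Int × Char) =>
        let acc := st.1 + (p.2.toNat : Int)
        (acc, PySem.List.pySetD st.2 p.1 acc))
      ((0 : Int), List.replicate l.length (0 : Int))
  let dp := st.2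
  -- m = {}; for i in range(n-1, -1, -1): e = s[i]; if e not in m: m[e] = i
  let m : PySem.Dict Char Int := (PySem.List.pyRange (n - 1) (-1) (-1)).foldl
      (fun m i =>
        let e := PySem.List.pyGetD l i ' '
        if m.contains e then m else m.insert e i)
      PySem.Dict.empty
  -- ans = []; for i, e in enumerate(s): if e in m and m[e] - i > 1: append; m.pop(e)
  let r := (PySem.List.enumerate l 0).foldl
      (fun (st : List Int × PySem.Dict Char Int) (p : Int × Char) =>
        match st.2.get? p.2 with
        | some j =>
          if j - p.1 > 1 then
            (st.1 ++ [PySem.List.pyGetD dp (j - 1) 0 - PySem.List.pyGetD dp p.1 0],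
             st.2.erase p.2)
          else (st.1, st.2)
        | none => (st.1, st.2))
      (([] : List Int), m)
  r.1

-- ===== PORT B =====
def asciirange_alt (s : String) : List Int :=
  let l := s.toList
  -- one pass: first[c] set only when absent, last[c] always updated
  let fl := (PySem.List.enumerate l 0).foldl
      (fun (st : PySem.Dict Char Int × PySem.Dict Char Int) (p : Int × Char) =>
        let f := if st.1.contains p.2 then st.1 else st.1.insert p.2 p.1
        (f, st.2.insert p.2 p.1))
      (PySem.Dict.empty, PySem.Dict.empty)
  -- for c, f in first.items(): l = last[c]; if l - f > 1: append sum(ord of s[f+1:l])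
  fl.1.items.foldl
      (fun (ans : List Int) (cf : Char × Int) =>
        let lst := fl.2.getD cf.1 0
        if lst - cf.2 > 1 then
          ans ++ [((PySem.List.slice l (some (cf.2 + 1)) (some lst)).map
                    (fun c => (c.toNat : Int))).sum]
        else ans)
      []

-- ===== PRECONDITION & SPEC =====
def Spec_asciirange (s : String) (out : List Int) : Prop := out = asciirange_alt s
instance (s : String) (out : List Int) : Decidable (Spec_asciirange s out) := by unfold Spec_asciirange; infer_instance

-- ===== CLAIM (what is proved, stated in full; the proofs are below) =====
def Claim_equal_asciirange : Prop := ∀ (s : String), Dom_asciirange s → Spec_asciirange s (asciirange s)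

-- ===== LEMMAS AND PROOFS =====

lemma get?_erase (d : PySem.Dict Char Int) (k k' : Char) :
    (d.erase k).get? k' = if k' = k then none else d.get? k' := by
  obtain ⟨items⟩ := d
  induction items with
  | nil => simp [PySem.Dict.erase, PySem.Dict.get?]
  | cons p rest ih =>
    simp only [PySem.Dict.erase, PySem.Dict.get?, List.filter_cons] at *
    by_cases hpk : p.1 = k <;> by_cases hpk' : p.1 = k' <;>
      simp_all [beq_iff_eq]

def ordInt (c : Char) : Int := (c.toNat : Int)
def lastIdx? : List (Int × Char) → Char → Option Int
  | [], _ => none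
  | p :: rest, c =>
    match lastIdx? rest c with
    | some j => some j
    | none => if p.2 = c then some p.1 else none
def firsts : List (Int × Char) → List (Int × Char)
  | [] => []
  | p :: rest => p :: (firsts rest).filter (fun q => q.2 ≠ p.2)
def psums : List Char → Int → List Int
  | [], _ => []
  | c :: cs, acc => (acc + ordInt c) :: psums cs (acc + ordInt c)

lemma mem_enum (l : List Char) (s : Nat) (p : Int × Char)
    (hp : p ∈ PySem.List.enumerate l (s : Int)) :
    ∃ k : Nat, k < l.length ∧ p.1 = ((s + k : Nat) : Int) ∧ l[k]? = some p.2 := by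
  induction l generalizing s with
  | nil => simp [PySem.List.enumerate] at hp
  | cons c cs ih =>
    rw [PySem.List.enumerate_cons] at hp
    rcases List.mem_cons.1 hp with h | h
    · exact ⟨0, by simp, by simp [h], by simp [h]⟩
    · have : ((s : Int) + 1) = ((s + 1 : Nat) : Int) := by push_cast; ring
      rw [this] at h
      obtain ⟨k, hk, h1, h2⟩ := ih (s + 1) h
      refine ⟨k + 1, by simp; omega, by push_cast at h1 ⊢; omega, by simpa using h2⟩

lemma lastIdx?_mem {es : List (Int × Char)} {c : Char} {j : Int}
    (h : lastIdx? es c = some j) : (j, c) ∈ es := by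
  induction es with
  | nil => simp [lastIdx?] at h
  | cons p rest ih =>
    rcases hr : lastIdx? rest c with _ | j'
    · rw [lastIdx?, hr] at h
      split_ifs at h with hc
      · obtain rfl := Option.some.inj h
        have : (p.1, c) = p := by rw [← hc]
        exact this ▸ List.mem_cons_self
    · rw [lastIdx?, hr] at h
      obtain rfl : j' = j := by simpa using h
      exact List.mem_cons_of_mem _ (ih hr)

lemma lastIdx?_isSome_of_mem {es : List (Int × Char)} {p : Int × Char}
    (h : p ∈ es) : (lastIdx? es p.2).isSome := by
  induction es with
  | nil => simp at h
  | cons q rest ih =>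
    rw [lastIdx?]
    rcases hr : lastIdx? rest p.2 with _ | j
    · rcases List.mem_cons.1 h with rfl | h'
      · simp
      · have := ih h'; rw [hr] at this; simp at this
    · simp

lemma firsts_sublist (es : List (Int × Char)) : List.Sublist (firsts es) es := by
  induction es with
  | nil => simp [firsts]
  | cons p rest ih =>
    rw [firsts]
    exact List.Sublist.cons₂ p ((List.filter_sublist (l := firsts rest)).trans ih)

lemma firsts_filter_char (pb : Char → Bool) (l : List (Int × Char)) :
    firsts (l.filter (fun q => pb q.2)) = (firsts l).filter (fun q => pb q.2) := by
  induction l with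
  | nil => simp [firsts]
  | cons q rest ih =>
    by_cases hq : pb q.2
    · rw [List.filter_cons_of_pos (by simpa using hq), firsts, firsts, ih,
        List.filter_cons_of_pos (by simpa using hq)]
      simp only [List.cons.injEq, true_and]
      rw [List.filter_comm]
    · rw [List.filter_cons_of_neg (by simpa using hq), firsts, ih,
        List.filter_cons_of_neg (by simpa using hq)]
      conv_rhs => rw [List.filter_filter]
      apply List.filter_congr
      intro x hx
      by_cases hpx : pb x.2
      · have : x.2 ≠ q.2 := fun h => hq (h ▸ hpx)
        simp [hpx, this]
      · simp [hpx]

lemma filterMap_eq_filter_filterMap {α β : Type} (g g' : α → Option β) (pb : α → Bool)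
    (l : List α) (h1 : ∀ x ∈ l, pb x = true → g x = g' x)
    (h2 : ∀ x ∈ l, pb x = false → g x = none) :
    l.filterMap g = (l.filter pb).filterMap g' := by
  induction l with
  | nil => simp
  | cons x rest ih =>
    have ih' := ih (fun y hy => h1 y (List.mem_cons_of_mem _ hy))
      (fun y hy => h2 y (List.mem_cons_of_mem _ hy))
    by_cases hx : pb x
    · rw [List.filter_cons_of_pos hx, List.filterMap_cons, List.filterMap_cons,
        h1 x List.mem_cons_self hx, ih']
    · rw [List.filter_cons_of_neg (by simpa using hx), List.filterMap_cons,
        h2 x List.mem_cons_self (by simpa using hx), ih']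

lemma foldl_if_append_eq_filterMap {α β : Type} (g : α → Option β) (pb : α → Prop)
    [DecidablePred pb] (f : α → β) (l : List α) (ans : List β)
    (h : ∀ x ∈ l, g x = if pb x then some (f x) else none) :
    l.foldl (fun acc x => if pb x then acc ++ [f x] else acc) ans = ans ++ l.filterMap g := by
  induction l generalizing ans with
  | nil => simp
  | cons x rest ih =>
    rw [List.foldl_cons, List.filterMap_cons, h x List.mem_cons_self]
    by_cases hx : pb x
    · rw [if_pos hx, if_pos hx, ih _ (fun y hy => h y (List.mem_cons_of_mem _ hy))]
      simp
    · rw [if_neg hx, if_neg hx]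
      exact ih _ (fun y hy => h y (List.mem_cons_of_mem _ hy))

lemma psums_getD (l : List Char) (acc : Int) (k : Nat) (hk : k < l.length) :
    (psums l acc).getD k 0 = acc + ((l.take (k + 1)).map ordInt).sum := by
  induction l generalizing acc k with
  | nil => simp at hk
  | cons c cs ih =>
    rcases k with _ | k
    · simp [psums]
    · rw [psums]
      simp only [List.getD_cons_succ]
      rw [ih _ k (by simpa using hk)]
      simp
      ring

lemma sum_ord_drop_take (l : List Char) (a b : Nat) (hab : a ≤ b) :
    (((l.drop a).take (b - a)).map ordInt).sum
      = ((l.take b).map ordInt).sum - ((l.take a).map ordInt).sum := by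
  have hb : b = a + (b - a) := by omega
  rw [hb, List.take_add]
  simp

lemma pair_fold {α β γ : Type} (f : α → γ → α) (g : β → γ → β) (l : List γ) (a : α) (b : β) :
    l.foldl (fun st x => (f st.1 x, g st.2 x)) (a, b) = (l.foldl f a, l.foldl g b) := by
  induction l generalizing a b with
  | nil => rfl
  | cons x rest ih => simpa using ih (f a x) (g b x)

def runA (dp : List Int) : List (Int × Char) → PySem.Dict Char Int → List Int
  | [], _ => []
  | p :: rest, m =>
    match m.get? p.2 with
    | some j =>
      if j - p.1 > 1 then
        (PySem.List.pyGetD dp (j - 1) 0 - PySem.List.pyGetD dp p.1 0) :: runA dp rest (m.erase p.2)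
      else runA dp rest m
    | none => runA dp rest m
def buildLast : List (Int × Char) → PySem.Dict Char Int
  | [] => PySem.Dict.empty
  | p :: rest =>
    let m := buildLast rest
    if m.contains p.2 then m else m.insert p.2 p.1
def gfun (dp : List Int) (m : PySem.Dict Char Int) (p : Int × Char) : Option Int :=
  match m.get? p.2 with
  | some j =>
    if j - p.1 > 1 then some (PySem.List.pyGetD dp (j - 1) 0 - PySem.List.pyGetD dp p.1 0)
    else none
  | none => none

lemma buildLast_get? (es : List (Int × Char)) (c : Char) :
    (buildLast es).get? c = lastIdx? es c := by
  induction es with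
  | nil => simp [buildLast, lastIdx?, PySem.Dict.get?, PySem.Dict.empty]
  | cons p rest ih =>
    rw [buildLast, lastIdx?]
    have hc := PySem.Dict.contains_eq_isSome_get? (buildLast rest) p.2
    by_cases hcc : (buildLast rest).contains p.2
    · rw [if_pos hcc, ih]
      rcases hr : lastIdx? rest c with _ | j
      · by_cases hpc : p.2 = c
        · exfalso
          rw [hc, hpc, ih, hr] at hcc; simp at hcc
        · simp [hpc]
      · simp
    · rw [if_neg hcc, PySem.Dict.get?_insert]
      by_cases hpc : c = p.2
      · subst hpc
        have hnone : lastIdx? rest p.2 = none := by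
          rw [hc, ih] at hcc
          rcases h : lastIdx? rest p.2 with _ | j
          · rfl
          · rw [h] at hcc; simp at hcc
        simp [hnone]
      · rw [if_neg hpc, ih]
        rcases lastIdx? rest c with _ | j
        · simp [(Ne.symm hpc : ¬ p.2 = c)]
        · simp

lemma last_get? (es : List (Int × Char)) (d : PySem.Dict Char Int) (c : Char) :
    (es.foldl (fun d (p : Int × Char) => d.insert p.2 p.1) d).get? c
      = match lastIdx? es c with
        | some j => some j
        | none => d.get? c := by
  induction es generalizing d with
  | nil => simp [lastIdx?]
  | cons p rest ih =>
    rw [List.foldl_cons, ih, lastIdx?]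
    rcases lastIdx? rest c with _ | j
    · simp only
      rw [PySem.Dict.get?_insert]
      by_cases hpc : c = p.2
      · simp [hpc]
      · rw [if_neg (Ne.symm hpc : ¬ p.2 = c), if_neg hpc]
    · simp

lemma first_items (es : List (Int × Char)) (d : PySem.Dict Char Int) :
    (es.foldl (fun d (p : Int × Char) =>
        if d.contains p.2 then d else d.insert p.2 p.1) d).items
      = d.items ++ (firsts (es.filter (fun p => !(d.contains p.2)))).map (fun p => (p.2, p.1)) := by
  induction es generalizing d with
  | nil => simp [firsts]
  | cons p rest ih =>
    rw [List.foldl_cons]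
    by_cases hc : d.contains p.2
    · rw [if_pos hc, List.filter_cons_of_neg (by simp [hc]), ih]
    · rw [if_neg hc, ih, List.filter_cons_of_pos (by simp [hc])]
      rw [PySem.Dict.items_insert_of_not_contains d p.1 (by simpa using hc)]
      rw [firsts, List.map_cons]
      have hfilt : rest.filter (fun q => !(d.insert p.2 p.1).contains q.2)
          = (rest.filter (fun q => !(d.contains q.2))).filter (fun q => q.2 ≠ p.2) := by
        rw [List.filter_filter]
        apply List.filter_congr
        intro x _
        rw [PySem.Dict.contains_insert]
        by_cases h1 : x.2 = p.2 <;> by_cases h2 : d.contains x.2 <;> simp [h1, h2]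
      rw [hfilt, firsts_filter_char (fun c => decide (c ≠ p.2))]
      simp

lemma loop3_eq (dp : List Int) (es : List (Int × Char)) (ans : List Int)
    (m : PySem.Dict Char Int) :
    (es.foldl (fun (st : List Int × PySem.Dict Char Int) (p : Int × Char) =>
        match st.2.get? p.2 with
        | some j =>
          if j - p.1 > 1 then
            (st.1 ++ [PySem.List.pyGetD dp (j - 1) 0 - PySem.List.pyGetD dp p.1 0],
             st.2.erase p.2)
          else (st.1, st.2)
        | none => (st.1, st.2)) (ans, m)).1
      = ans ++ runA dp es m := by
  induction es generalizing ans m with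
  | nil => simp [runA]
  | cons p rest ih =>
    rw [List.foldl_cons, runA]
    rcases h : m.get? p.2 with _ | j
    · simpa using ih ans m
    · simp only
      by_cases hj : j - p.1 > 1
      · rw [if_pos hj, if_pos hj, ih]
        simp
      · rw [if_neg hj, if_neg hj, ih]

lemma runA_char (dp : List Int) (es : List (Int × Char)) (m : PySem.Dict Char Int)
    (hpw : es.Pairwise (fun p q => p.1 < q.1)) :
    runA dp es m = (firsts es).filterMap (gfun dp m) := by
  induction es generalizing m with
  | nil => simp [runA, firsts]
  | cons p rest ih =>
    have hpw' := (List.pairwise_cons.1 hpw).2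
    have hlt := (List.pairwise_cons.1 hpw).1
    rw [runA, firsts, List.filterMap_cons]
    rcases h : m.get? p.2 with _ | j
    · have hg : gfun dp m p = none := by simp [gfun, h]
      rw [hg]
      simp only []
      rw [ih _ hpw']
      apply filterMap_eq_filter_filterMap
      · intro x _ _; rfl
      · intro x hx hfalse
        have hx2 : x.2 = p.2 := by simpa using hfalse
        simp [gfun, hx2, h]
    · by_cases hj : j - p.1 > 1
      · have hg : gfun dp m p
            = some (PySem.List.pyGetD dp (j - 1) 0 - PySem.List.pyGetD dp p.1 0) := by
          simp [gfun, h, hj]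
        rw [hg]
        simp only []
        rw [if_pos hj, ih _ hpw']
        congr 1
        apply filterMap_eq_filter_filterMap
        · intro x _ hx2
          have : x.2 ≠ p.2 := by simpa using hx2
          simp [gfun, get?_erase, this]
        · intro x _ hfalse
          have hx2 : x.2 = p.2 := by simpa using hfalse
          simp [gfun, get?_erase, hx2]
      · have hg : gfun dp m p = none := by simp [gfun, h, hj]
        rw [hg]
        simp only []
        rw [if_neg hj, ih _ hpw']
        apply filterMap_eq_filter_filterMap
        · intro x _ _; rfl
        · intro x hx hfalse
          have hx2 : x.2 = p.2 := by simpa using hfalse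
          have hxm : p.1 < x.1 := hlt x ((firsts_sublist rest).mem hx)
          simp only [gfun, hx2, h]
          rw [if_neg (by omega)]

lemma drop_set_of_lt {α : Type} (l : List α) (n m : Nat) (a : α) (h : n < m) :
    (l.set n a).drop m = l.drop m := by
  apply List.ext_getElem
  · simp
  · intro i h1 h2
    rw [List.getElem_drop, List.getElem_drop, List.getElem_set_ne (by omega)]

lemma take_set_succ (dp0 : List Int) (s : Nat) (a : Int) (hs : s < dp0.length) :
    (dp0.set s a).take (s + 1) = dp0.take s ++ [a] := by
  apply List.ext_getElem
  · simp; omega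
  · intro i h1 h2
    simp only [List.getElem_take, List.getElem_set]
    by_cases hi : i = s
    · subst hi
      simp [List.length_take]
    · simp [List.getElem_append, List.length_take]
      have hilt : i < s := by simp [List.length_take] at h2; omega
      simp [hilt, Ne.symm hi]
      omega

lemma dp_loop (l' : List Char) (s : Nat) (acc0 : Int) (dp0 : List Int)
    (h : s + l'.length ≤ dp0.length) :
    (PySem.List.enumerate l' (s : Int)).foldl
      (fun (st : Int × List Int) (p : Int × Char) =>
        let acc := st.1 + (p.2.toNat : Int)
        (acc, PySem.List.pySetD st.2 p.1 acc)) (acc0, dp0)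
      = (acc0 + (l'.map ordInt).sum,
         dp0.take s ++ psums l' acc0 ++ dp0.drop (s + l'.length)) := by
  induction l' generalizing s acc0 dp0 with
  | nil => simp [PySem.List.enumerate, psums]
  | cons c cs ih =>
    rw [PySem.List.enumerate_cons, List.foldl_cons]
    have hcast : ((s : Int) + 1) = ((s + 1 : Nat) : Int) := by push_cast; ring
    simp only [PySem.List.pySetD_natCast]
    rw [hcast, ih (s + 1) (acc0 + (c.toNat : Int)) (dp0.set s (acc0 + (c.toNat : Int)))
        (by simp at h ⊢; omega)]
    have hs : s < dp0.length := by simp at h; omega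
    simp only [Prod.mk.injEq]
    constructor
    · simp [ordInt]; ring
    · have h1 : (dp0.set s (acc0 + (c.toNat : Int))).take (s + 1)
          = dp0.take s ++ [acc0 + (c.toNat : Int)] := take_set_succ _ _ _ hs
      have h2 : (dp0.set s (acc0 + (c.toNat : Int))).drop (s + 1 + cs.length)
          = dp0.drop (s + 1 + cs.length) := drop_set_of_lt _ _ _ _ (by omega)
      rw [h1, h2, psums]
      have harith : s + (c :: cs).length = s + 1 + cs.length := by simp; omega
      rw [harith]
      simp [ordInt]

lemma items_empty : (PySem.Dict.empty : PySem.Dict Char Int).items = [] := rfl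

lemma pyGetD_enum (l : List Char) (p : Int × Char) (hp : p ∈ PySem.List.enumerate l 0) :
    PySem.List.pyGetD l p.1 ' ' = p.2 := by
  have h0 : ((0 : Nat) : Int) = 0 := by norm_num
  obtain ⟨k, hk, h1, h2⟩ := mem_enum l 0 p (by rw [h0]; exact hp)
  rw [h1]
  simp only [Nat.zero_add, PySem.List.pyGetD_natCast]
  simp [List.getD, h2]

lemma pairwise_enum (l : List Char) :
    (PySem.List.enumerate l 0).Pairwise (fun p q => p.1 < q.1) := by
  have := PySem.List.pairwise_lt_pyRange_one 0 (0 + (l.length : Int))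
  rw [← PySem.List.map_fst_enumerate l 0] at this
  exact (List.pairwise_map.1 this)

-- ===== VERDICT (by name: the statement is the Claim_ definition above) =====
theorem asciirange_spec : Claim_equal_asciirange := by
  intro s _
  unfold Spec_asciirange
  simp only [asciirange, asciirange_alt]
  generalize s.toList = l
  -- B: split the pair fold
  have hsplit : (PySem.List.enumerate l 0).foldl
      (fun (st : PySem.Dict Char Int × PySem.Dict Char Int) (p : Int × Char) =>
        (if st.1.contains p.2 then st.1 else st.1.insert p.2 p.1, st.2.insert p.2 p.1))
      (PySem.Dict.empty, PySem.Dict.empty)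
      = ((PySem.List.enumerate l 0).foldl
          (fun (d : PySem.Dict Char Int) (p : Int × Char) =>
            if d.contains p.2 then d else d.insert p.2 p.1) PySem.Dict.empty,
         (PySem.List.enumerate l 0).foldl
          (fun (d : PySem.Dict Char Int) (p : Int × Char) => d.insert p.2 p.1)
          PySem.Dict.empty) :=
    pair_fold (fun (d : PySem.Dict Char Int) (p : Int × Char) =>
        if d.contains p.2 then d else d.insert p.2 p.1)
      (fun (d : PySem.Dict Char Int) (p : Int × Char) => d.insert p.2 p.1)
      (PySem.List.enumerate l 0) PySem.Dict.empty PySem.Dict.empty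
  rw [hsplit]
  -- B: the first-occurrence dict's items
  rw [first_items]
  -- A: the prefix-sum list
  have hdp : ((PySem.List.enumerate l 0).foldl
      (fun (st : Int × List Int) (p : Int × Char) =>
        (st.1 + (p.2.toNat : Int), PySem.List.pySetD st.2 p.1 (st.1 + (p.2.toNat : Int))))
      (0, List.replicate l.length 0)).2 = psums l 0 := by
    have hd := dp_loop l 0 0 (List.replicate l.length 0) (by simp)
    rw [Nat.cast_zero] at hd
    rw [hd]
    simp
  rw [hdp]
  -- A: the last-occurrence dict
  have hfoldr : ∀ es : List (Int × Char),
      List.foldr (fun (p : Int × Char) m =>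
        if m.contains p.2 then m else m.insert p.2 p.1) PySem.Dict.empty es = buildLast es := by
    intro es
    induction es with
    | nil => rfl
    | cons p rest ih => simp [buildLast, ih]
  have hm : (PySem.List.pyRange ((l.length : Int) - 1) (-1) (-1)).foldl
      (fun m i =>
        if m.contains (PySem.List.pyGetD l i ' ') then m
        else m.insert (PySem.List.pyGetD l i ' ') i)
      PySem.Dict.empty = buildLast (PySem.List.enumerate l 0) := by
    rw [PySem.List.pyRange_neg_one_eq_reverse,
      show (-1 : Int) + 1 = 0 from by norm_num,
      show ((l.length : Int) - 1) + 1 = (l.length : Int) from by ring]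
    rw [show PySem.List.pyRange 0 (l.length : Int) 1
          = (PySem.List.enumerate l 0).map (fun p => p.1) from by
        rw [PySem.List.map_fst_enumerate]; norm_num]
    rw [← List.map_reverse, List.foldl_map]
    rw [PySem.List.foldl_congr_mem _ _
        (fun (m : PySem.Dict Char Int) (p : Int × Char) =>
          if m.contains p.2 then m else m.insert p.2 p.1) _
        (by
          intro acc x hx
          rw [pyGetD_enum l x (List.mem_reverse.1 hx)])]
    rw [List.foldl_reverse, hfoldr]
  rw [hm]
  rw [loop3_eq, runA_char _ _ _ (pairwise_enum l), List.nil_append]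
  simp only [PySem.Dict.contains_empty, Bool.not_false, List.filter_true, items_empty,
    List.nil_append, List.foldl_map]
  rw [foldl_if_append_eq_filterMap (gfun (psums l 0) (buildLast (PySem.List.enumerate l 0)))
      (fun p : Int × Char =>
        ((PySem.List.enumerate l 0).foldl
          (fun (d : PySem.Dict Char Int) (p : Int × Char) => d.insert p.2 p.1)
          PySem.Dict.empty).getD p.2 0 - p.1 > 1)
      (fun p : Int × Char =>
        ((PySem.List.slice l (some (p.1 + 1))
          (some (((PySem.List.enumerate l 0).foldl
            (fun (d : PySem.Dict Char Int) (p : Int × Char) => d.insert p.2 p.1)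
            PySem.Dict.empty).getD p.2 0))).map (fun c => (c.toNat : Int))).sum)]
  · rw [List.nil_append]
  · intro p hp
    have hpes : p ∈ PySem.List.enumerate l 0 :=
      (firsts_sublist (PySem.List.enumerate l 0)).mem hp
    obtain ⟨j, hj⟩ := Option.isSome_iff_exists.1 (lastIdx?_isSome_of_mem hpes)
    have hlastD : ((PySem.List.enumerate l 0).foldl
        (fun (d : PySem.Dict Char Int) (p : Int × Char) => d.insert p.2 p.1)
        PySem.Dict.empty).getD p.2 0 = j := by
      rw [PySem.Dict.getD_eq_get?_getD, last_get?, hj]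
      rfl
    have hg : gfun (psums l 0) (buildLast (PySem.List.enumerate l 0)) p
        = if j - p.1 > 1 then
            some (PySem.List.pyGetD (psums l 0) (j - 1) 0
              - PySem.List.pyGetD (psums l 0) p.1 0)
          else none := by
      rw [gfun, buildLast_get?, hj]
    rw [hg, hlastD]
    by_cases hc : j - p.1 > 1
    · rw [if_pos hc, if_pos hc]
      obtain ⟨a, ha, ha1, ha2⟩ := mem_enum l 0 p (by rw [Nat.cast_zero]; exact hpes)
      have hjes : (j, p.2) ∈ PySem.List.enumerate l 0 := lastIdx?_mem hj
      obtain ⟨b, hb, hb1, hb2⟩ := mem_enum l 0 (j, p.2) (by rw [Nat.cast_zero]; exact hjes)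
      simp only [Nat.zero_add] at ha1 hb1
      have hab : a + 2 ≤ b := by rw [ha1, hb1] at hc; omega
      congr 1
      rw [ha1, hb1]
      rw [show ((b : Int) - 1) = ((b - 1 : Nat) : Int) from by push_cast [Nat.cast_sub (by omega : 1 ≤ b)]; ring]
      rw [PySem.List.pyGetD_natCast, PySem.List.pyGetD_natCast]
      rw [show ((a : Int) + 1) = ((a + 1 : Nat) : Int) from by push_cast; ring]
      rw [PySem.List.slice_natCast]
      rw [psums_getD l 0 (b - 1) (by omega), psums_getD l 0 a ha]
      rw [show (fun (c : Char) => ((c.toNat : Nat) : Int)) = ordInt from rfl]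
      rw [sum_ord_drop_take l (a + 1) b (by omega)]
      rw [show b - 1 + 1 = b from by omega]
      ring
    · rw [if_neg hc, if_neg hc]
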